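-- pv_equiv track=rewrite | github.com/an-nix/PickupWinder | fix_diag.py | find_close_paren
-- ===== SOURCE A (Python) =====
-- def find_close_paren(text: str, pos: int) -> int:
--     """Find the matching ')' for an '(' at pos, skipping strings."""
--     depth, i, n = 0, pos, len(text)
--     while i < n:
--         c = text[i]
--         if c == '"':
--             i += 1
--             while i < n:
--                 c2 = text[i]
--                 if c2 == '\\': i += 2; continue
--                 if c2 == '"':  i += 1; break
--                 i += 1
--         elif c == '(': depth += 1; i += 1
--         elif c == ')':
--             depth -= 1; i += 1
--             if depth == 0: return i - 1
--         else: i += 1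
--     return -1
-- ===== SOURCE B (Python) =====
-- def find_close_paren(text: str, pos: int) -> int:
--     """Find the matching ')' for an '(' at pos, skipping strings."""
--     n = len(text)
--     depth = 0
--     in_string = False
--     escaped = False
--     i = pos
--     while i < n:
--         c = text[i]
--         if escaped:
--             escaped = False
--         elif in_string:
--             if c == '\\':
--                 escaped = True
--             elif c == '"':
--                 in_string = False
--         elif c == '"':
--             in_string = True
--         elif c == '(':
--             depth += 1
--         elif c == ')':
--             depth -= 1
--             if depth == 0:
--                 return i
--         i += 1
--     return -1
-- ===== Notes on version B (the rewrite author's own statement) =====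
-- stated objective: simpler
-- what changed: Replaced the nested string-skipping inner while-loop with a single flat per-character loop driven by explicit in_string/escaped state flags.
import Mathlib
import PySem

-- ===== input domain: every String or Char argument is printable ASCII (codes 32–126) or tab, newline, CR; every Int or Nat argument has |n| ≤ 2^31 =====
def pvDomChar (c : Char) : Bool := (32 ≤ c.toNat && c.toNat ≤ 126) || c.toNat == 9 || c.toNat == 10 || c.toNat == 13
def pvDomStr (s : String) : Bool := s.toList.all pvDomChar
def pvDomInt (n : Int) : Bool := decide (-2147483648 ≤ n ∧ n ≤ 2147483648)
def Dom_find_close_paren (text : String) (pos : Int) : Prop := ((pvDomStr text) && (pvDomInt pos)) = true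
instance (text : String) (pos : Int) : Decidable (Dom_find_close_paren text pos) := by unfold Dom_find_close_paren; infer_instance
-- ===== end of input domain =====

-- B replaces A's nested string-skipping inner loop by one flat per-character loop with
-- explicit in_string/escaped state flags; same cost, simpler single-loop shape.

-- ===== PORT A =====
-- inner `while` of A: skip the string literal starting after the opening quote; returns the new i
def pvA_inner (cs : List Char) (n i : Int) (fuel : Nat) : Int :=
  match fuel with
  | 0 => i
  | fuel + 1 =>
    if i < n then
      match PySem.List.pyGet? cs i with
      | none => i  -- Python raises here (pos below -len); excluded by Pre_
      | some c2 =>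
        if c2 = '\\' then pvA_inner cs n (i + 2) fuel
        else if c2 = '"' then i + 1
        else pvA_inner cs n (i + 1) fuel
    else i

-- outer `while` of A
def pvA_loop (cs : List Char) (n depth i : Int) (fuel : Nat) : Int :=
  match fuel with
  | 0 => -1
  | fuel + 1 =>
    if i < n then
      match PySem.List.pyGet? cs i with
      | none => -2  -- Python raises here; excluded by Pre_
      | some c =>
        if c = '"' then pvA_loop cs n depth (pvA_inner cs n (i + 1) fuel) fuel
        else if c = '(' then pvA_loop cs n (depth + 1) (i + 1) fuel
        else if c = ')' then
          (if depth - 1 = 0 then i else pvA_loop cs n (depth - 1) (i + 1) fuel)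
        else pvA_loop cs n depth (i + 1) fuel
    else -1

def find_close_paren (text : String) (pos : Int) : Int :=
  pvA_loop text.toList (text.toList.length : Int) 0 pos (2 * text.toList.length + 2)

-- ===== PORT B =====
-- B: one flat loop; state = (depth, in_string, escaped)
def pvB_loop (cs : List Char) (n i depth : Int) (instr esc : Bool) (fuel : Nat) : Int :=
  match fuel with
  | 0 => -1
  | fuel + 1 =>
    if i < n then
      match PySem.List.pyGet? cs i with
      | none => -2  -- Python raises here; excluded by Pre_
      | some c =>
        if esc then pvB_loop cs n (i + 1) depth instr false fuel
        else if instr then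
          if c = '\\' then pvB_loop cs n (i + 1) depth instr true fuel
          else if c = '"' then pvB_loop cs n (i + 1) depth false esc fuel
          else pvB_loop cs n (i + 1) depth instr esc fuel
        else if c = '"' then pvB_loop cs n (i + 1) depth true esc fuel
        else if c = '(' then pvB_loop cs n (i + 1) (depth + 1) instr esc fuel
        else if c = ')' then
          (if depth - 1 = 0 then i else pvB_loop cs n (i + 1) (depth - 1) instr esc fuel)
        else pvB_loop cs n (i + 1) depth instr esc fuel
    else -1

def find_close_paren_alt (text : String) (pos : Int) : Int :=
  pvB_loop text.toList (text.toList.length : Int) pos 0 false false (2 * text.toList.length + 2)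

-- ===== PRECONDITION & SPEC =====
-- Pre_ excludes exactly the inputs where A raises IndexError: pos below -len(text)
-- (text[i] with i < -len raises in Python; B raises there too).
def Pre_find_close_paren (text : String) (pos : Int) : Prop :=
  -(text.toList.length : Int) ≤ pos
instance (text : String) (pos : Int) : Decidable (Pre_find_close_paren text pos) := by
  unfold Pre_find_close_paren; infer_instance

def pvWitness_find_close_paren : String × Int := ("(a \"b)\" c)", 0)

def Spec_find_close_paren (text : String) (pos : Int) (out : Int) : Prop := out = find_close_paren_alt text pos
instance (text : String) (pos : Int) (out : Int) : Decidable (Spec_find_close_paren text pos out) := by unfold Spec_find_close_paren; infer_instance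

-- ===== CLAIM (what is proved, stated in full; the proofs are below) =====
def Claim_equal_find_close_paren : Prop := ∀ (text : String) (pos : Int), Dom_find_close_paren text pos → Pre_find_close_paren text pos → Spec_find_close_paren text pos (find_close_paren text pos)

-- ===== LEMMAS AND PROOFS =====

-- B's loop ignores fuel beyond the number of remaining positions
theorem pvB_fuel_irrel (cs : List Char) (n : Int) :
    ∀ k : Nat, ∀ i depth : Int, ∀ instr esc : Bool, ∀ f g : Nat,
      (n - i).toNat ≤ k → k < f → k < g →
      pvB_loop cs n i depth instr esc f = pvB_loop cs n i depth instr esc g := by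
  intro k
  induction k with
  | zero =>
    intro i depth instr esc f g hk hf hg
    match f, g with
    | f + 1, g + 1 =>
      simp only [pvB_loop]
      have : ¬ i < n := by omega
      simp [this]
  | succ k ih =>
    intro i depth instr esc f g hk hf hg
    match f, g with
    | f + 1, g + 1 =>
      simp only [pvB_loop]
      by_cases hin : i < n
      · have H : ∀ (d : Int) (a b : Bool),
            pvB_loop cs n (i + 1) d a b f = pvB_loop cs n (i + 1) d a b g :=
          fun d a b => ih (i + 1) d a b f g (by omega) (by omega) (by omega)
        simp only [hin, if_true]
        rcases PySem.List.pyGet? cs i with _ | c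
        · rfl
        · dsimp only
          split_ifs <;> (first | rfl | apply H)
      · simp [hin]

theorem pv_get_some (cs : List Char) (i : Int) (h1 : -(cs.length : Int) ≤ i)
    (h2 : i < (cs.length : Int)) : ∃ c, PySem.List.pyGet? cs i = some c := by
  cases h : PySem.List.pyGet? cs i with
  | none => exact absurd h (by rw [PySem.List.pyGet?_eq_none_iff, not_not]; exact ⟨h1, h2⟩)
  | some c => exact ⟨c, rfl⟩

-- combined bisimulation: code state (left conjunct) and in-string state (right conjunct)
theorem pv_both (cs : List Char) :
    ∀ k : Nat,
      (∀ i depth : Int, ∀ f g : Nat,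
        ((cs.length : Int) - i).toNat ≤ k → -(cs.length : Int) ≤ i → k < f → k < g →
        pvA_loop cs (cs.length : Int) depth i f = pvB_loop cs (cs.length : Int) i depth false false g) ∧
      (∀ i depth : Int, ∀ f fo g : Nat,
        ((cs.length : Int) - i).toNat ≤ k → -(cs.length : Int) ≤ i → k < f → k < fo → k < g →
        pvB_loop cs (cs.length : Int) i depth true false g =
          pvA_loop cs (cs.length : Int) depth (pvA_inner cs (cs.length : Int) i f) fo) := by
  intro k
  induction k using Nat.strong_induction_on with
  | _ k ih =>
  constructor
  · -- code state
    intro i depth f g hk hi hf hg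
    obtain ⟨f, rfl⟩ : ∃ f', f = f' + 1 := ⟨f - 1, by omega⟩
    obtain ⟨g, rfl⟩ : ∃ g', g = g' + 1 := ⟨g - 1, by omega⟩
    simp only [pvA_loop, pvB_loop]
    by_cases hin : i < (cs.length : Int)
    · obtain ⟨c, hc⟩ := pv_get_some cs i hi hin
      have hk1 : 1 ≤ k := by omega
      by_cases h1 : c = '"'
      · simp only [hin, if_true, hc, h1, Bool.false_eq_true, if_false]
        exact ((ih (k - 1) (by omega)).2 (i + 1) depth f f g
          (by omega) (by omega) (by omega) (by omega) (by omega)).symm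
      · by_cases h2 : c = '('
        · simp only [hin, if_true, hc, h2, Bool.false_eq_true, if_false]
          exact (ih (k - 1) (by omega)).1 (i + 1) (depth + 1) f g
            (by omega) (by omega) (by omega) (by omega)
        · by_cases h3 : c = ')'
          · simp only [hin, if_true, hc, h3, Bool.false_eq_true, if_false]
            by_cases hd : depth - 1 = 0
            · simp [hd]
            · simp only [hd, if_false]
              exact (ih (k - 1) (by omega)).1 (i + 1) (depth - 1) f g
                (by omega) (by omega) (by omega) (by omega)
          · simp only [hin, if_true, hc, if_neg h1, if_neg h2, if_neg h3,
              Bool.false_eq_true, if_false]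
            exact (ih (k - 1) (by omega)).1 (i + 1) depth f g
              (by omega) (by omega) (by omega) (by omega)
    · simp [hin]
  · -- in-string state
    intro i depth f fo g hk hi hf hfo hg
    obtain ⟨f', rfl⟩ : ∃ f', f = f' + 1 := ⟨f - 1, by omega⟩
    obtain ⟨fo', rfl⟩ : ∃ fo', fo = fo' + 1 := ⟨fo - 1, by omega⟩
    obtain ⟨g', rfl⟩ : ∃ g', g = g' + 1 := ⟨g - 1, by omega⟩
    by_cases hin : i < (cs.length : Int)
    · obtain ⟨c, hc⟩ := pv_get_some cs i hi hin
      have hk1 : 1 ≤ k := by omega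
      by_cases h1 : c = '\\'
      · -- backslash: A skips two chars at once, B consumes them in two steps
        simp only [pvA_inner, pvB_loop, hin, if_true, hc, h1, Bool.false_eq_true, if_false]
        by_cases hin2 : i + 1 < (cs.length : Int)
        · obtain ⟨g'', rfl⟩ : ∃ g'', g' = g'' + 1 := ⟨g' - 1, by omega⟩
          obtain ⟨c2, hc2⟩ := pv_get_some cs (i + 1) (by omega) hin2
          simp only [pvB_loop, hin2, if_true, hc2]
          rw [show i + 1 + 1 = i + 2 from by ring]
          exact (ih (k - 2) (by omega)).2 (i + 2) depth f' (fo' + 1) g''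
            (by omega) (by omega) (by omega) (by omega) (by omega)
        · -- the backslash is the last character: both sides run off the end
          obtain ⟨g'', rfl⟩ : ∃ g'', g' = g'' + 1 := ⟨g' - 1, by omega⟩
          have hA : pvA_inner cs (cs.length : Int) (i + 2) f' = i + 2 := by
            cases f' with
            | zero => rfl
            | succ f'' => simp only [pvA_inner]; rw [if_neg (by omega)]
          rw [hA]
          simp only [pvB_loop, pvA_loop]
          rw [if_neg hin2, if_neg (by omega)]
      · by_cases h2 : c = '"'
        · -- closing quote: back to code state
          have hI : pvA_inner cs (cs.length : Int) i (f' + 1) = i + 1 := by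
            simp only [pvA_inner, hin, if_true, hc]
            rw [if_neg h1, if_pos h2]
          have hB : pvB_loop cs (cs.length : Int) i depth true false (g' + 1) =
              pvB_loop cs (cs.length : Int) (i + 1) depth false false g' := by
            simp only [pvB_loop, hin, if_true, hc, Bool.false_eq_true, if_false]
            rw [if_neg h1, if_pos h2]
          rw [hI, hB]
          exact ((ih (k - 1) (by omega)).1 (i + 1) depth (fo' + 1) g'
            (by omega) (by omega) (by omega) (by omega)).symm
        · -- ordinary character inside the string
          simp only [pvA_inner, pvB_loop, hin, if_true, hc, if_neg h1, if_neg h2,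
            Bool.false_eq_true, if_false]
          exact (ih (k - 1) (by omega)).2 (i + 1) depth f' (fo' + 1) g'
            (by omega) (by omega) (by omega) (by omega) (by omega)
    · -- i already past the end
      have hA : pvA_inner cs (cs.length : Int) i (f' + 1) = i := by
        simp only [pvA_inner]; rw [if_neg hin]
      rw [hA]
      simp only [pvB_loop, pvA_loop]
      rw [if_neg hin, if_neg hin]

-- ===== VERDICT (by name: the statement is the Claim_ definition above) =====
theorem find_close_paren_spec : Claim_equal_find_close_paren := by
  intro text pos _ hpre
  unfold Spec_find_close_paren find_close_paren find_close_paren_alt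
  set cs := text.toList with hcs
  have hpre' : -(cs.length : Int) ≤ pos := hpre
  have hk : ((cs.length : Int) - pos).toNat ≤ 2 * cs.length := by omega
  have h := (pv_both cs (2 * cs.length)).1 pos 0 (2 * cs.length + 2) (2 * cs.length + 1) hk hpre' (by omega) (by omega)
  rw [h]
  exact pvB_fuel_irrel cs (cs.length : Int) (2 * cs.length) pos 0 false false
    (2 * cs.length + 1) (2 * cs.length + 2) hk (by omega) (by omega)
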